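-- pv_equiv track=rewrite | github.com/LukeCoulson1/Comfyui_LoraCombine | info/check_compatibility.py | detect_lora_type
-- ===== SOURCE A (Python) =====
-- def detect_lora_type(keys):
--     """
--     Detect the type of LoRA based on key patterns.
--     """
--     key_list = list(keys)
--
--     # Check for standard LoRA patterns
--     if any(".lora_down.weight" in key for key in key_list):
--         return "standard_lora"
--     elif any(".lora_A" in key or ".lora_B" in key for key in key_list):
--         return "peft_lora"
--     elif any("q_proj" in key or "k_proj" in key or "v_proj" in key for key in key_list):
--         return "transformer_lora"
--     elif any(".weight" in key for key in key_list):
--         return "generic_weights"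
--     else:
--         return "unknown"
-- ===== SOURCE B (Python) =====
-- def detect_lora_type(keys):
--     has_down = has_peft = has_qkv = has_weight = False
--     for key in keys:
--         if ".lora_down.weight" in key:
--             has_down = True
--         if ".lora_A" in key or ".lora_B" in key:
--             has_peft = True
--         if "q_proj" in key or "k_proj" in key or "v_proj" in key:
--             has_qkv = True
--         if ".weight" in key:
--             has_weight = True
--     if has_down:
--         return "standard_lora"
--     if has_peft:
--         return "peft_lora"
--     if has_qkv:
--         return "transformer_lora"
--     if has_weight:
--         return "generic_weights"
--     return "unknown"
-- ===== Notes on version B (the rewrite author's own statement) =====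
-- stated objective: alternative
-- what changed: Replaces A's four sequential any() scans over the key list with a single pass that accumulates four boolean flags, followed by a priority decision on the flags.
import Mathlib
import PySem

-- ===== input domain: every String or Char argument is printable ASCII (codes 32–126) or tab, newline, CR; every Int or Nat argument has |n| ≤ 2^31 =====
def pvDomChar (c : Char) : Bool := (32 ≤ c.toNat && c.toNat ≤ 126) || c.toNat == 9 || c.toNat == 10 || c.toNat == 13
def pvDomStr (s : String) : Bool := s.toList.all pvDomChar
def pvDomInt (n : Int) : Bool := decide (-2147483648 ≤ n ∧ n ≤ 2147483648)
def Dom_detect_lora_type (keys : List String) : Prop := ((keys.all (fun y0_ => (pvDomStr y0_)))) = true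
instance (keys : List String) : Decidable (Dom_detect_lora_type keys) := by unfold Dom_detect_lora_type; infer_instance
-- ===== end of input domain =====

-- B replaces A's four sequential any() scans with one pass building four boolean flags and a priority decision (alternative decomposition, same cost).


-- ===== PORT A =====
def detect_lora_type (keys : List String) : String :=
  let key_list := keys
  if key_list.any (fun key => PySem.Str.isIn ".lora_down.weight" key) then
    "standard_lora"
  else if key_list.any (fun key => PySem.Str.isIn ".lora_A" key || PySem.Str.isIn ".lora_B" key) then
    "peft_lora"
  else if key_list.any (fun key => PySem.Str.isIn "q_proj" key || PySem.Str.isIn "k_proj" key || PySem.Str.isIn "v_proj" key) then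
    "transformer_lora"
  else if key_list.any (fun key => PySem.Str.isIn ".weight" key) then
    "generic_weights"
  else
    "unknown"

-- ===== PORT B =====
def detect_lora_type_alt (keys : List String) : String :=
  let flags := keys.foldl
    (fun (st : Bool × Bool × Bool × Bool) key =>
      let st := if PySem.Str.isIn ".lora_down.weight" key then (true, st.2) else st
      let st := if PySem.Str.isIn ".lora_A" key || PySem.Str.isIn ".lora_B" key then (st.1, true, st.2.2) else st
      let st := if PySem.Str.isIn "q_proj" key || PySem.Str.isIn "k_proj" key || PySem.Str.isIn "v_proj" key then (st.1, st.2.1, true, st.2.2.2) else st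
      let st := if PySem.Str.isIn ".weight" key then (st.1, st.2.1, st.2.2.1, true) else st
      st)
    (false, false, false, false)
  if flags.1 then "standard_lora"
  else if flags.2.1 then "peft_lora"
  else if flags.2.2.1 then "transformer_lora"
  else if flags.2.2.2 then "generic_weights"
  else "unknown"

-- ===== PRECONDITION & SPEC =====
def Spec_detect_lora_type (keys : List String) (out : String) : Prop := out = detect_lora_type_alt keys
instance (keys : List String) (out : String) : Decidable (Spec_detect_lora_type keys out) := by unfold Spec_detect_lora_type; infer_instance

-- ===== CLAIM (what is proved, stated in full; the proofs are below) =====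
def Claim_equal_detect_lora_type : Prop := ∀ (keys : List String), Dom_detect_lora_type keys → Spec_detect_lora_type keys (detect_lora_type keys)

-- ===== LEMMAS AND PROOFS =====


-- Generic: B's single-pass flag accumulator computes the four any-scans (or-ed with the initial flags).
theorem pv_flags_eq (p1 p2 p3 p4 : String → Bool) (keys : List String) (a b c d : Bool) :
    keys.foldl
      (fun (st : Bool × Bool × Bool × Bool) key =>
        let st := if p1 key then (true, st.2) else st
        let st := if p2 key then (st.1, true, st.2.2) else st
        let st := if p3 key then (st.1, st.2.1, true, st.2.2.2) else st
        let st := if p4 key then (st.1, st.2.1, st.2.2.1, true) else st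
        st)
      (a, b, c, d)
    = (a || keys.any p1, b || keys.any p2, c || keys.any p3, d || keys.any p4) := by
  induction keys generalizing a b c d with
  | nil => simp
  | cons k t ih =>
    simp only [List.foldl_cons, List.any_cons]
    by_cases h1 : p1 k <;> by_cases h2 : p2 k <;> by_cases h3 : p3 k <;> by_cases h4 : p4 k <;>
      simp only [h1, h2, h3, h4, if_true, ih] <;> simp

-- ===== VERDICT (by name: the statement is the Claim_ definition above) =====
theorem detect_lora_type_spec : Claim_equal_detect_lora_type := by
  intro keys _
  unfold Spec_detect_lora_type detect_lora_type detect_lora_type_alt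
  rw [pv_flags_eq]
  simp only [Bool.false_or]
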